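-- pv_equiv track=rewrite | github.com/himanushi/seed-lm-experiments | experiments/03_prompt_growth/grow.py | find_seed_in_tokens
-- ===== SOURCE A (Python) =====
-- def find_seed_in_tokens(seed_text, aligned):
--     """
--     seed語のBERTトークン位置を特定する
--
--     aligned内の表層形でseed_textを完全一致→部分一致で検索し、
--     一致する単語グループのインデックスを返す。
--     """
--     # 完全一致を優先
--     for i, w in enumerate(aligned):
--         if w["surface"] == seed_text:
--             return [i]
--
--     # 部分一致（seedが複数単語にまたがる場合）
--     surfaces = [w["surface"] for w in aligned]
--     concat = ""
--     char_to_word = {}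
--     for wi, s in enumerate(surfaces):
--         for c in s:
--             char_to_word[len(concat)] = wi
--             concat += c
--
--     start = concat.find(seed_text)
--     if start >= 0:
--         end = start + len(seed_text)
--         word_indices = sorted(set(
--             char_to_word[pos] for pos in range(start, end)
--             if pos in char_to_word
--         ))
--         return word_indices
--
--     return None
-- ===== SOURCE B (Python) =====
-- def find_seed_in_tokens(seed_text, aligned):
--     # exact-match scan (unchanged), then map the matched char range of the
--     # joined surfaces back to word intervals by cumulative offsets.
--     for i, w in enumerate(aligned):
--         if w["surface"] == seed_text:
--             return [i]
--
--     surfaces = [w["surface"] for w in aligned]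
--     concat = "".join(surfaces)
--     start = concat.find(seed_text)
--     if start < 0:
--         return None
--     end = start + len(seed_text)
--     out = []
--     off = 0
--     for i, s in enumerate(surfaces):
--         if off < end and start < off + len(s) and s:
--             out.append(i)
--         off += len(s)
--     return out
-- ===== Notes on version B (the rewrite author's own statement) =====
-- stated objective: simpler
-- what changed: The substring phase drops A's per-character position->word dict and the sorted(set(...)) pass: B joins the surfaces once, finds the seed, and collects in one pass the indices of nonempty surfaces whose cumulative-offset interval overlaps the matched char range.
import Mathlib
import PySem

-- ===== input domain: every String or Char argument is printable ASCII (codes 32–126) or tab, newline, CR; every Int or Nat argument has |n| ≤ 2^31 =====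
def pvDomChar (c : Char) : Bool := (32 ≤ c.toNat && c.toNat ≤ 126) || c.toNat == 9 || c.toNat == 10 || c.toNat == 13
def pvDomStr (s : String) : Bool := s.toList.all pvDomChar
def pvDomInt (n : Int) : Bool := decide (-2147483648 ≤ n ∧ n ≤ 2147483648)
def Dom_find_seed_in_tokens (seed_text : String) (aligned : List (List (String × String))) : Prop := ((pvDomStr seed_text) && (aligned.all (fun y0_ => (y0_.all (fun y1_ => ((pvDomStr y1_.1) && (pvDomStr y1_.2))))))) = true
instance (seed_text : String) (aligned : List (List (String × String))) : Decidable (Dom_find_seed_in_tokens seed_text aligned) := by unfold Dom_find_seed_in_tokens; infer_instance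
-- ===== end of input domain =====

-- B replaces A's per-character dict (char position -> word index) by cumulative
-- word offsets and an interval-overlap test; objective: simpler (no per-char dict,
-- no set/sort pass). Equivalence is about the return value; neither mutates inputs.

-- ===== PORT A =====
-- w["surface"] — total via default; exact on Pre_ (every consulted dict has the key)
def pvSurfaceA (w : List (String × String)) : List Char :=
  ((PySem.Dict.mk w).getD "surface" "").toList

-- the exact-match loop 'for i, w in enumerate(aligned): if w["surface"] == seed_text: return [i]'
def pvExactA (seed : List Char) : List (List (String × String)) → Int → Option Int
  | [], _ => none
  | w :: rest, i => if pvSurfaceA w = seed then some i else pvExactA seed rest (i + 1)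

-- 'for wi, s in enumerate(surfaces): for c in s: char_to_word[len(concat)] = wi; concat += c'
def pvBuildA (wi : Int) (surfaces : List (List Char))
    (st : List Char × PySem.Dict Int Int) : List Char × PySem.Dict Int Int :=
  match surfaces with
  | [] => st
  | s :: rest =>
      pvBuildA (wi + 1) rest
        (s.foldl (fun st c => (st.1 ++ [c], st.2.insert (st.1.length : Int) wi)) st)

def find_seed_in_tokens (seed_text : String) (aligned : List (List (String × String))) : Option (List Int) :=
  let seed := seed_text.toList
  match pvExactA seed aligned 0 with
  | some i => some [i]
  | none =>
    let surfaces := aligned.map pvSurfaceA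
    let built := pvBuildA 0 surfaces ([], PySem.Dict.empty)
    let start := PySem.Chars.find built.1 seed
    if 0 ≤ start then
      some (PySem.List.sorted
        (PySem.Set.ofList
          (((PySem.List.pyRange start (start + (seed.length : Int)) 1).filter
              (fun pos => built.2.contains pos)).map (fun pos => built.2.getD pos 0)))
        (fun x => x) false)
    else none

-- ===== PORT B =====
def pvSurfaceB (w : List (String × String)) : List Char :=
  ((PySem.Dict.mk w).getD "surface" "").toList

def pvExactB (seed : List Char) : List (List (String × String)) → Int → Option Int
  | [], _ => none
  | w :: rest, i => if pvSurfaceB w = seed then some i else pvExactB seed rest (i + 1)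

-- 'for i, s in enumerate(surfaces): if off < end and start < off + len(s) and s: out.append(i); off += len(s)'
def pvCollectB (start endp : Int) (i off : Int) : List (List Char) → List Int
  | [] => []
  | s :: rest =>
      (if off < endp ∧ start < off + (s.length : Int) ∧ s ≠ [] then [i] else []) ++
        pvCollectB start endp (i + 1) (off + (s.length : Int)) rest

def find_seed_in_tokens_alt (seed_text : String) (aligned : List (List (String × String))) : Option (List Int) :=
  let seed := seed_text.toList
  match pvExactB seed aligned 0 with
  | some i => some [i]
  | none =>
    let surfaces := aligned.map pvSurfaceB
    let concat := surfaces.flatten      -- ''.join(surfaces): plain concatenation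
    let start := PySem.Chars.find concat seed
    if start < 0 then none
    else some (pvCollectB start (start + (seed.length : Int)) 0 0 surfaces)

-- ===== PRECONDITION & SPEC =====
-- Pre_ excludes exactly the inputs where A raises KeyError: a dict lacking the
-- "surface" key is reached before any exact match (both programs raise there).
def Pre_find_seed_in_tokens (seed_text : String) (aligned : List (List (String × String))) : Prop :=
  (aligned.takeWhile (fun w => (PySem.Dict.mk w).contains "surface") = aligned) ∨
  (∃ w ∈ aligned.takeWhile (fun w => (PySem.Dict.mk w).contains "surface"),
      (PySem.Dict.mk w).getD "surface" "" = seed_text)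
instance (seed_text : String) (aligned : List (List (String × String))) : Decidable (Pre_find_seed_in_tokens seed_text aligned) := by unfold Pre_find_seed_in_tokens; infer_instance

def pvWitness_find_seed_in_tokens : String × (List (List (String × String))) :=
  ("bc", [[("surface", "ab")], [("surface", "cd")]])

def Spec_find_seed_in_tokens (seed_text : String) (aligned : List (List (String × String))) (out : Option (List Int)) : Prop := out = find_seed_in_tokens_alt seed_text aligned
instance (seed_text : String) (aligned : List (List (String × String))) (out : Option (List Int)) : Decidable (Spec_find_seed_in_tokens seed_text aligned out) := by unfold Spec_find_seed_in_tokens; infer_instance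

-- ===== CLAIM (what is proved, stated in full; the proofs are below) =====
def Claim_equal_find_seed_in_tokens : Prop := ∀ (seed_text : String) (aligned : List (List (String × String))), Dom_find_seed_in_tokens seed_text aligned → Pre_find_seed_in_tokens seed_text aligned → Spec_find_seed_in_tokens seed_text aligned (find_seed_in_tokens seed_text aligned)

-- ===== LEMMAS AND PROOFS =====

-- proof-side description of A's char_to_word: the word index containing char pos
def pvWordAt (pos : Int) : List (List Char) → Int → Int → Option Int
  | [], _, _ => none
  | s :: rest, i, off =>
      if off ≤ pos ∧ pos < off + (s.length : Int) then some i
      else pvWordAt pos rest (i + 1) (off + (s.length : Int))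

theorem pvSurface_eq : pvSurfaceA = pvSurfaceB := rfl

theorem pvExact_eq (seed : List Char) (l : List (List (String × String))) (i : Int) :
    pvExactA seed l i = pvExactB seed l i := by
  induction l generalizing i with
  | nil => rfl
  | cons w rest ih => simp [pvExactA, pvExactB, pvSurfaceA, pvSurfaceB, ih]

theorem pvInner_spec (s : List Char) (wi : Int) :
    ∀ (cs : List Char) (d : PySem.Dict Int Int),
      (s.foldl (fun st c => (st.1 ++ [c], st.2.insert (st.1.length : Int) wi)) (cs, d)).1
        = cs ++ s ∧
      (∀ pos v, (s.foldl (fun st c => (st.1 ++ [c], st.2.insert (st.1.length : Int) wi)) (cs, d)).2.getD pos v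
        = if (cs.length : Int) ≤ pos ∧ pos < (cs.length : Int) + (s.length : Int) then wi else d.getD pos v) ∧
      (∀ pos, (s.foldl (fun st c => (st.1 ++ [c], st.2.insert (st.1.length : Int) wi)) (cs, d)).2.contains pos
        = (decide ((cs.length : Int) ≤ pos ∧ pos < (cs.length : Int) + (s.length : Int)) || d.contains pos)) := by
  induction s with
  | nil =>
      intro cs d
      refine ⟨by simp, ?_, ?_⟩
      · intro pos v
        simp only [List.foldl_nil, List.length_nil, Nat.cast_zero, add_zero]
        rw [if_neg (by omega)]
      · intro pos
        simp only [List.foldl_nil, List.length_nil, Nat.cast_zero, add_zero]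
        rw [decide_eq_false (by omega), Bool.false_or]
  | cons c rest ih =>
      intro cs d
      obtain ⟨h1, h2, h3⟩ := ih (cs ++ [c]) (d.insert (cs.length : Int) wi)
      refine ⟨?_, ?_, ?_⟩
      · simpa [List.foldl_cons] using h1
      · intro pos v
        have := h2 pos v
        simp only [List.foldl_cons] at this ⊢
        rw [this, PySem.Dict.getD_insert]
        simp only [List.length_append, List.length_cons, List.length_nil, Nat.cast_add,
          Nat.cast_one, Nat.cast_zero]
        split_ifs <;> first | rfl | omega
      · intro pos
        have := h3 pos
        simp only [List.foldl_cons] at this ⊢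
        rw [this, PySem.Dict.contains_insert]
        simp only [List.length_append, List.length_cons, List.length_nil, Nat.cast_add,
          Nat.cast_one, Nat.cast_zero]
        rcases h : d.contains pos with _ | _
        all_goals
          simp only [h, Bool.or_false, Bool.or_true]
          try
            rw [Bool.eq_iff_iff]
            simp only [Bool.or_eq_true, Bool.and_eq_true, decide_eq_true_eq, beq_iff_eq]
            omega
          try simp

theorem pvWordAt_none_of_lt (pos : Int) (surfaces : List (List Char)) (i off : Int)
    (h : pos < off) : pvWordAt pos surfaces i off = none := by
  induction surfaces generalizing i off with
  | nil => rfl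
  | cons s rest ih =>
      simp only [pvWordAt]
      rw [if_neg (by omega)]
      exact ih _ _ (by omega)

theorem pvBuildA_spec (surfaces : List (List Char)) :
    ∀ (wi : Int) (cs : List Char) (d : PySem.Dict Int Int),
      (pvBuildA wi surfaces (cs, d)).1 = cs ++ surfaces.flatten ∧
      (∀ pos v, (pvBuildA wi surfaces (cs, d)).2.getD pos v
        = ((pvWordAt pos surfaces wi (cs.length : Int)).getD (d.getD pos v))) ∧
      (∀ pos, (pvBuildA wi surfaces (cs, d)).2.contains pos
        = ((pvWordAt pos surfaces wi (cs.length : Int)).isSome || d.contains pos)) := by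
  induction surfaces with
  | nil => intro wi cs d; refine ⟨by simp [pvBuildA], ?_, ?_⟩ <;> intro pos <;> simp [pvBuildA, pvWordAt]
  | cons s rest ih =>
      intro wi cs d
      obtain ⟨g1, g2, g3⟩ := pvInner_spec s wi cs d
      have hfold : (s.foldl (fun st c => (st.1 ++ [c], st.2.insert (st.1.length : Int) wi)) (cs, d))
          = ((s.foldl (fun st c => (st.1 ++ [c], st.2.insert (st.1.length : Int) wi)) (cs, d)).1,
             (s.foldl (fun st c => (st.1 ++ [c], st.2.insert (st.1.length : Int) wi)) (cs, d)).2) := rfl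
      obtain ⟨h1, h2, h3⟩ := ih (wi + 1) (cs ++ s)
        ((s.foldl (fun st c => (st.1 ++ [c], st.2.insert (st.1.length : Int) wi)) (cs, d)).2)
      refine ⟨?_, ?_, ?_⟩
      · show (pvBuildA (wi+1) rest _).1 = _
        rw [hfold, g1] at *
        simpa using h1
      · intro pos v
        show (pvBuildA (wi+1) rest _).2.getD pos v = _
        rw [hfold, g1, h2 pos v, g2 pos v]
        simp only [pvWordAt, List.length_append, Nat.cast_add]
        split_ifs with h
        · rw [pvWordAt_none_of_lt pos rest (wi + 1) _ (by omega)]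
          simp
        · rfl
      · intro pos
        show (pvBuildA (wi+1) rest _).2.contains pos = _
        rw [hfold, g1, h3 pos, g3 pos]
        simp only [pvWordAt, List.length_append, Nat.cast_add]
        split_ifs with h
        · rw [pvWordAt_none_of_lt pos rest (wi + 1) _ (by omega)]
          simp [h]
        · simp [h]

theorem pvWordAt_isSome (surfaces : List (List Char)) :
    ∀ (i off pos : Int),
      (pvWordAt pos surfaces i off).isSome
        = decide (off ≤ pos ∧ pos < off + (surfaces.flatten.length : Int)) := by
  induction surfaces with
  | nil => intro i off pos; simp [pvWordAt]; try omega
  | cons s rest ih =>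
      intro i off pos
      simp only [pvWordAt]
      split_ifs with h
      · simp only [Option.isSome_some, List.flatten_cons, List.length_append, Nat.cast_add]
        symm
        simp only [decide_eq_true_eq]
        omega
      · rw [ih]
        simp only [List.flatten_cons, List.length_append, Nat.cast_add]
        rw [decide_eq_decide]
        omega

theorem pvWordAt_some_bounds (surfaces : List (List Char)) :
    ∀ (i off pos x : Int), pvWordAt pos surfaces i off = some x →
      i ≤ x ∧ off ≤ pos := by
  induction surfaces with
  | nil => intro i off pos x h; simp [pvWordAt] at h
  | cons s rest ih =>
      intro i off pos x h
      simp only [pvWordAt] at h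
      split_ifs at h with hc
      · cases h; omega
      · have := ih (i + 1) (off + (s.length : Int)) pos x h
        omega

theorem pvCollectB_mem (surfaces : List (List Char)) :
    ∀ (start endp i off x : Int), (start < endp ∨ endp ≤ off) →
      (x ∈ pvCollectB start endp i off surfaces ↔
        ∃ pos, start ≤ pos ∧ pos < endp ∧ pvWordAt pos surfaces i off = some x) := by
  induction surfaces with
  | nil => intro start endp i off x hwin; simp [pvCollectB, pvWordAt]
  | cons s rest ih =>
      intro start endp i off x hwin
      simp only [pvCollectB, List.mem_append]
      have hrec := ih start endp (i + 1) (off + (s.length : Int)) x (by omega)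
      constructor
      · rintro (hx | hx)
        · split_ifs at hx with hc
          · simp at hx
            subst hx
            obtain ⟨hc1, hc2, hc3⟩ := hc
            have hs0 : 0 < (s.length : Int) := by
              have := List.length_pos_iff.mpr hc3
              omega
            have hse : start < endp := by rcases hwin with h | h <;> omega
            refine ⟨max start off, le_max_left _ _, max_lt hse hc1, ?_⟩
            simp only [pvWordAt]
            rw [if_pos ⟨le_max_right _ _, max_lt hc2 (by omega)⟩]
          · simp at hx
        · obtain ⟨pos, hp1, hp2, hp3⟩ := hrec.mp hx
          have hb := pvWordAt_some_bounds rest (i + 1) (off + (s.length : Int)) pos x hp3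
          refine ⟨pos, hp1, hp2, ?_⟩
          simp only [pvWordAt]
          rw [if_neg (by omega)]
          exact hp3
      · rintro ⟨pos, hp1, hp2, hp3⟩
        simp only [pvWordAt] at hp3
        split_ifs at hp3 with hc
        · cases hp3
          left
          rw [if_pos ⟨by omega, by omega, by rintro rfl; simp at hc; omega⟩]
          simp
        · right
          exact hrec.mpr ⟨pos, hp1, hp2, hp3⟩

theorem pvCollectB_lb (surfaces : List (List Char)) :
    ∀ (start endp i off x : Int), x ∈ pvCollectB start endp i off surfaces → i ≤ x := by
  induction surfaces with
  | nil => intro start endp i off x h; simp [pvCollectB] at h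
  | cons s rest ih =>
      intro start endp i off x h
      simp only [pvCollectB, List.mem_append] at h
      rcases h with h | h
      · split_ifs at h <;> simp at h; omega
      · have := ih start endp (i + 1) (off + (s.length : Int)) x h; omega

theorem pvCollectB_pairwise (surfaces : List (List Char)) :
    ∀ (start endp i off : Int), (pvCollectB start endp i off surfaces).Pairwise (· < ·) := by
  induction surfaces with
  | nil => intro start endp i off; simp [pvCollectB]
  | cons s rest ih =>
      intro start endp i off
      simp only [pvCollectB]
      apply List.pairwise_append.mpr
      refine ⟨?_, ih start endp (i + 1) (off + (s.length : Int)), ?_⟩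
      · split_ifs <;> simp
      · intro a ha b hb
        have hb' := pvCollectB_lb rest start endp (i + 1) (off + (s.length : Int)) b hb
        split_ifs at ha <;> simp at ha
        omega

-- ===== VERDICT (by name: the statement is the Claim_ definition above) =====
theorem find_seed_in_tokens_spec : Claim_equal_find_seed_in_tokens := by
  intro seed_text aligned _ _
  unfold Spec_find_seed_in_tokens
  simp only [find_seed_in_tokens, find_seed_in_tokens_alt, ← pvSurface_eq, ← pvExact_eq]
  cases hx : pvExactA seed_text.toList aligned 0 with
  | some i => rfl
  | none =>
    simp only []
    obtain ⟨b1, b2, b3⟩ := pvBuildA_spec (aligned.map pvSurfaceA) 0 [] PySem.Dict.empty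
    rw [List.nil_append] at b1
    simp only [List.length_nil, Nat.cast_zero, PySem.Dict.getD_empty, PySem.Dict.contains_empty,
      Bool.or_false] at b2 b3
    rw [b1]
    set sl := seed_text.toList with hsl
    set surfaces := aligned.map pvSurfaceA with hsurf
    set L : Int := (surfaces.flatten.length : Int) with hL
    set start := PySem.Chars.find surfaces.flatten sl with hstart
    by_cases hs : 0 ≤ start
    · rw [if_pos hs, if_neg (by omega)]
      set endp := start + (sl.length : Int) with hendp
      have hfs := PySem.Chars.find_spec (s := surfaces.flatten) (sub := sl) hs
      have hlen : endp ≤ L := by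
        have hpre := hfs.1.length_le
        have hdl : (List.drop start.toNat surfaces.flatten).length = surfaces.flatten.length - start.toNat := by
          simp
        rw [hdl] at hpre
        have hsl2 : start ≤ L := PySem.Chars.find_le_length surfaces.flatten sl
        omega
      have hwin : start < endp ∨ endp ≤ (0 : Int) := by
        by_cases hz : sl = []
        · right
          have : start = 0 := by rw [hstart, hz, PySem.Chars.find_nil]
          simp [hendp, this, hz]
        · left
          have : 0 < (sl.length : Int) := by
            have := List.length_pos_iff.mpr hz
            omega
          omega
      congr 1
      have hfilter : ((PySem.List.pyRange start endp 1).filter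
            (fun pos => (pvBuildA 0 surfaces ([], PySem.Dict.empty)).2.contains pos))
          = PySem.List.pyRange start endp 1 := by
        apply List.filter_eq_self.mpr
        intro pos hpos
        rw [PySem.List.mem_pyRange_one] at hpos
        rw [b3 pos, pvWordAt_isSome]
        simp only [decide_eq_true_eq]
        omega
      rw [hfilter]
      apply PySem.List.sorted_eq_of_perm_of_pairwise_lt
      · apply (List.perm_ext_iff_of_nodup (pvCollectB_pairwise surfaces start endp 0 0).nodup
          (PySem.Set.nodup_ofList _)).mpr
        intro x
        rw [PySem.Set.mem_ofList, pvCollectB_mem surfaces start endp 0 0 x hwin]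
        simp only [List.mem_map]
        constructor
        · rintro ⟨pos, hp1, hp2, hp3⟩
          refine ⟨pos, PySem.List.mem_pyRange_one.mpr ⟨hp1, hp2⟩, ?_⟩
          rw [b2 pos 0, hp3]
          rfl
        · rintro ⟨pos, hpos, hval⟩
          rw [PySem.List.mem_pyRange_one] at hpos
          have hsome : (pvWordAt pos surfaces 0 0).isSome := by
            rw [pvWordAt_isSome]
            simp only [decide_eq_true_eq]
            omega
          obtain ⟨y, hy⟩ := Option.isSome_iff_exists.mp hsome
          rw [b2 pos 0, hy] at hval
          simp only [Option.getD_some] at hval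
          exact ⟨pos, hpos.1, hpos.2, by rw [hy, hval]⟩
      · exact pvCollectB_pairwise surfaces start endp 0 0
    · rw [if_neg hs, if_pos (by omega)]
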